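-- pv_equiv track=rewrite | github.com/gaboCiber/atc-alert-system | ASR/evaluation/dataset_loader.py | align_data
-- ===== SOURCE A (Python) =====
-- from typing import Dict, List, Optional, Tuple
--
-- def align_data(
--     ground_truth: Dict[str, str],
--     transcriptions: Dict[str, str],
--     skip_missing: bool = True
-- ) -> List[Tuple[str, str, str]]:
--     """
--     Alinea ground truth con transcripciones por timestamp.
--
--     Args:
--         ground_truth: Diccionario {timestamp: texto}
--         transcriptions: Diccionario {timestamp: texto}
--         skip_missing: Si True, omite timestamps sin par
--
--     Returns:
--         Lista de tuplas (timestamp, reference, hypothesis)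
--     """
--     aligned = []
--
--     all_timestamps = set(ground_truth.keys()) | set(transcriptions.keys())
--
--     for ts in sorted(all_timestamps):
--         ref = ground_truth.get(ts, "")
--         hyp = transcriptions.get(ts, "")
--
--         if skip_missing and (not ref or not hyp):
--             continue
--
--         aligned.append((ts, ref, hyp))
--
--     return aligned
-- ===== SOURCE B (Python) =====
-- def align_data(ground_truth, transcriptions, skip_missing=True):
--     """Sorted-merge join: sort each dict's keys separately, then walk both
--     sorted lists with two pointers, emitting rows in one merge pass."""
--     gkeys = sorted(ground_truth)
--     tkeys = sorted(transcriptions)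
--     out = []
--     i = j = 0
--     while i < len(gkeys) or j < len(tkeys):
--         if j >= len(tkeys) or (i < len(gkeys) and gkeys[i] < tkeys[j]):
--             k = gkeys[i]; i += 1
--             ref, hyp = ground_truth[k], ""
--         elif i >= len(gkeys) or tkeys[j] < gkeys[i]:
--             k = tkeys[j]; j += 1
--             ref, hyp = "", transcriptions[k]
--         else:
--             k = gkeys[i]; i += 1; j += 1
--             ref, hyp = ground_truth[k], transcriptions[k]
--         if skip_missing and (not ref or not hyp):
--             continue
--         out.append((k, ref, hyp))
--     return out
-- ===== Notes on version B (the rewrite author's own statement) =====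
-- stated objective: alternative
-- what changed: B replaces A's union-set-then-sort-then-filter loop with a sorted-merge join: each dict's keys are sorted separately and one two-pointer merge pass over the two sorted key lists emits the rows.
import Mathlib
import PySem

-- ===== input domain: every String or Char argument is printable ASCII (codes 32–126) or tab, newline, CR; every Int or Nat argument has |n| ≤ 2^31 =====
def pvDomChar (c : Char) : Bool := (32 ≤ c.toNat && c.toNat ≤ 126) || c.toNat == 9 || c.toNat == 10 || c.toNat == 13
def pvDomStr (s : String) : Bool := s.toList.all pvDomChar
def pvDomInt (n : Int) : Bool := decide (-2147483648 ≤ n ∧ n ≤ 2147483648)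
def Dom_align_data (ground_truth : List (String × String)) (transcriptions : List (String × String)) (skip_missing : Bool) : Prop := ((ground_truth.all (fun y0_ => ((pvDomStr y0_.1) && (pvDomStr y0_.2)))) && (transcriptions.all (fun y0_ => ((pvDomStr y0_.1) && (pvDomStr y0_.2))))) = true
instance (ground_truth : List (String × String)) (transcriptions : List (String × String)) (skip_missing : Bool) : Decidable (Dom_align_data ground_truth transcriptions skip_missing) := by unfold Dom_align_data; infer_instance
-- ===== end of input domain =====

-- B is a sorted-merge join: each dict's keys are sorted separately and one two-pointer merge pass
-- emits the rows, instead of A's union-set-then-sort loop with an inner skip test. Objective: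
-- alternative algorithm, same asymptotic cost.

-- ===== PORT A =====
def align_data (ground_truth : List (String × String)) (transcriptions : List (String × String)) (skip_missing : Bool) : List (String × String × String) :=
  let g := PySem.Dict.ofList ground_truth
  let t := PySem.Dict.ofList transcriptions
  let all_timestamps : PySem.Set String :=
    PySem.Set.union (PySem.Set.ofList (PySem.Dict.keys g)) (PySem.Set.ofList (PySem.Dict.keys t))
  (PySem.List.sorted all_timestamps (fun x => x) false).foldl
    (fun aligned ts =>
      let ref := PySem.Dict.getD g ts ""
      let hyp := PySem.Dict.getD t ts ""
      if skip_missing && (ref == "" || hyp == "") then aligned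
      else aligned ++ [(ts, ref, hyp)]) []

-- ===== PORT B =====
-- the two-pointer while loop of Source B, as the obvious structural recursion on the two key-list
-- suffixes; ground_truth[k] / transcriptions[k] are ported as getD with "" (the key is always
-- present in that branch, so the default only totalizes the lookup)
def alignMerge (g t : PySem.Dict String String) (skip : Bool) :
    List String → List String → List (String × String × String)
  | [], [] => []
  | k :: gs, [] =>
      let ref := PySem.Dict.getD g k ""
      let rest := alignMerge g t skip gs []
      if skip && (ref == "" || ("" : String) == "") then rest else (k, ref, "") :: rest
  | [], k :: ts =>
      let hyp := PySem.Dict.getD t k ""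
      let rest := alignMerge g t skip [] ts
      if skip && (("" : String) == "" || hyp == "") then rest else (k, "", hyp) :: rest
  | k :: gs, k' :: ts =>
      if k < k' then
        let ref := PySem.Dict.getD g k ""
        let rest := alignMerge g t skip gs (k' :: ts)
        if skip && (ref == "" || ("" : String) == "") then rest else (k, ref, "") :: rest
      else if k' < k then
        let hyp := PySem.Dict.getD t k' ""
        let rest := alignMerge g t skip (k :: gs) ts
        if skip && (("" : String) == "" || hyp == "") then rest else (k', "", hyp) :: rest
      else
        let ref := PySem.Dict.getD g k ""
        let hyp := PySem.Dict.getD t k ""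
        let rest := alignMerge g t skip gs ts
        if skip && (ref == "" || hyp == "") then rest else (k, ref, hyp) :: rest
  termination_by xs ys => xs.length + ys.length

def align_data_alt (ground_truth : List (String × String)) (transcriptions : List (String × String)) (skip_missing : Bool) : List (String × String × String) :=
  let g := PySem.Dict.ofList ground_truth
  let t := PySem.Dict.ofList transcriptions
  let gkeys := PySem.List.sorted (PySem.Dict.keys g) (fun x => x) false
  let tkeys := PySem.List.sorted (PySem.Dict.keys t) (fun x => x) false
  alignMerge g t skip_missing gkeys tkeys

-- ===== PRECONDITION & SPEC =====
def Spec_align_data (ground_truth : List (String × String)) (transcriptions : List (String × String)) (skip_missing : Bool) (out : List (String × String × String)) : Prop := out = align_data_alt ground_truth transcriptions skip_missing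
instance (ground_truth : List (String × String)) (transcriptions : List (String × String)) (skip_missing : Bool) (out : List (String × String × String)) : Decidable (Spec_align_data ground_truth transcriptions skip_missing out) := by unfold Spec_align_data; infer_instance

-- ===== CLAIM (what is proved, stated in full; the proofs are below) =====
def Claim_equal_align_data : Prop := ∀ (ground_truth : List (String × String)) (transcriptions : List (String × String)) (skip_missing : Bool), Dom_align_data ground_truth transcriptions skip_missing → Spec_align_data ground_truth transcriptions skip_missing (align_data ground_truth transcriptions skip_missing)

-- ===== LEMMAS AND PROOFS =====

-- the key sequence produced by the two-pointer merge (proof-side abstraction of alignMerge)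
def mergeKeys : List String → List String → List String
  | [], ys => ys
  | x :: xs, [] => x :: mergeKeys xs []
  | x :: xs, y :: ys =>
      if x < y then x :: mergeKeys xs (y :: ys)
      else if y < x then y :: mergeKeys (x :: xs) ys
      else x :: mergeKeys xs ys
  termination_by xs ys => xs.length + ys.length

theorem mem_mergeKeys : ∀ (xs ys : List String) (a : String),
    a ∈ mergeKeys xs ys ↔ a ∈ xs ∨ a ∈ ys := by
  intro xs ys a
  fun_induction mergeKeys xs ys with
  | case1 ys => simp
  | case2 x xs ih => simp [ih]
  | case3 x xs y ys h ih => simp [ih]; tauto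
  | case4 x xs y ys h h' ih => simp [ih]; tauto
  | case5 x xs y ys h h' ih =>
    have hxy : x = y := le_antisymm (not_lt.1 h') (not_lt.1 h)
    subst hxy; simp [ih]; tauto

theorem mergeKeys_pairwise : ∀ (xs ys : List String),
    xs.Pairwise (· < ·) → ys.Pairwise (· < ·) →
    (mergeKeys xs ys).Pairwise (· < ·) := by
  intro xs ys hx hy
  fun_induction mergeKeys xs ys with
  | case1 ys => exact hy
  | case2 x xs ih =>
    rw [List.pairwise_cons] at hx ⊢
    refine ⟨?_, ih hx.2 hy⟩
    intro b hb
    rcases (mem_mergeKeys _ _ b).1 hb with h | h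
    · exact hx.1 b h
    · simp at h
  | case3 x xs y ys hlt ih =>
    rw [List.pairwise_cons] at hx ⊢
    refine ⟨?_, ih hx.2 hy⟩
    intro b hb
    rcases (mem_mergeKeys _ _ b).1 hb with h | h
    · exact hx.1 b h
    · rcases List.mem_cons.1 h with rfl | h
      · exact hlt
      · rw [List.pairwise_cons] at hy
        exact lt_trans hlt (hy.1 b h)
  | case4 x xs y ys hnlt hlt ih =>
    rw [List.pairwise_cons] at hy ⊢
    refine ⟨?_, ih hx hy.2⟩
    intro b hb
    rcases (mem_mergeKeys _ _ b).1 hb with h | h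
    · rcases List.mem_cons.1 h with rfl | h
      · exact hlt
      · rw [List.pairwise_cons] at hx
        exact lt_trans hlt (hx.1 b h)
    · exact hy.1 b h
  | case5 x xs y ys hnlt hnlt' ih =>
    have hxy : x = y := le_antisymm (not_lt.1 hnlt') (not_lt.1 hnlt)
    rw [List.pairwise_cons] at hx hy ⊢
    refine ⟨?_, ih hx.2 hy.2⟩
    intro b hb
    rcases (mem_mergeKeys _ _ b).1 hb with h | h
    · exact hx.1 b h
    · exact hxy ▸ hy.1 b h

-- sorted of a Nodup list is strictly increasing
theorem sorted_nodup_pairwise_lt (xs : List String) (h : xs.Nodup) :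
    (PySem.List.sorted xs (fun x => x) false).Pairwise (· < ·) := by
  have hperm : xs.Perm (PySem.Set.ofList xs) := by
    rw [List.perm_ext_iff_of_nodup h (PySem.Set.nodup_ofList xs)]
    intro a; simp [PySem.Set.mem_ofList]
  rw [PySem.List.sorted_eq_sorted_of_perm xs (PySem.Set.ofList xs) (fun x => x)
    (fun a b hab => hab) hperm]
  exact PySem.List.sorted_ofList_pairwise_lt _

theorem getD_ne_default_mem_keys {d : PySem.Dict String String} {k : String}
    (h : ¬ PySem.Dict.getD d k "" = "") : k ∈ PySem.Dict.keys d := by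
  by_contra hmem
  have hc : PySem.Dict.contains d k = false := by
    rw [← Bool.not_eq_true, PySem.Dict.contains_iff_mem_keys]; exact hmem
  exact h (PySem.Dict.getD_of_not_contains _ _ hc)

theorem getD_of_not_mem_keys {d : PySem.Dict String String} {k : String}
    (h : k ∉ PySem.Dict.keys d) : PySem.Dict.getD d k "" = "" := by
  by_contra hne
  exact h (getD_ne_default_mem_keys hne)

-- the merge pass equals filter-then-map over the merged key sequence
theorem alignMerge_eq (g t : PySem.Dict String String) (skip : Bool) :
    ∀ (xs ys : List String), xs.Pairwise (· < ·) → ys.Pairwise (· < ·) →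
    (∀ k ∈ xs, k ∉ ys → PySem.Dict.getD t k "" = "") →
    (∀ k ∈ ys, k ∉ xs → PySem.Dict.getD g k "" = "") →
    alignMerge g t skip xs ys =
      ((mergeKeys xs ys).filter
          (fun k => !(skip && (PySem.Dict.getD g k "" == "" || PySem.Dict.getD t k "" == "")))).map
        (fun k => (k, PySem.Dict.getD g k "", PySem.Dict.getD t k "")) := by
  have key : ∀ (n : Nat) (xs ys : List String), xs.length + ys.length ≤ n →
      xs.Pairwise (· < ·) → ys.Pairwise (· < ·) →
      (∀ k ∈ xs, k ∉ ys → PySem.Dict.getD t k "" = "") →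
      (∀ k ∈ ys, k ∉ xs → PySem.Dict.getD g k "" = "") →
      alignMerge g t skip xs ys =
        ((mergeKeys xs ys).filter
            (fun k => !(skip && (PySem.Dict.getD g k "" == "" || PySem.Dict.getD t k "" == "")))).map
          (fun k => (k, PySem.Dict.getD g k "", PySem.Dict.getD t k "")) := by
    intro n
    induction n with
    | zero =>
      intro xs ys hlen
      match xs, ys with
      | [], [] => intro _ _ _ _; simp [alignMerge, mergeKeys]
      | x :: xs, _ => simp at hlen
      | [], y :: ys => simp at hlen
    | succ n ih =>
      intro xs ys hlen
      match xs, ys with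
      | [], [] => intro _ _ _ _; simp [alignMerge, mergeKeys]
      | k :: gs, [] =>
        intro hx hy h1 h2
        rw [List.pairwise_cons] at hx
        have ht : PySem.Dict.getD t k "" = "" := h1 k (by simp) (by simp)
        have ihe := ih gs [] (by simp at hlen ⊢; omega) hx.2 hy
          (fun a ha hna => h1 a (by simp [ha]) hna)
          (fun a ha hna => h2 a ha (by simp at ha))
        simp only [alignMerge, mergeKeys, List.filter_cons, ht]
        cases skip <;> simp_all
      | [], k :: ts =>
        intro hx hy h1 h2
        rw [List.pairwise_cons] at hy
        have hg : PySem.Dict.getD g k "" = "" := h2 k (by simp) (by simp)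
        have ihe := ih [] ts (by simp at hlen ⊢; omega) hx hy.2
          (fun a ha hna => h1 a ha (by simp at ha))
          (fun a ha hna => h2 a (by simp [ha]) hna)
        simp only [alignMerge]
        cases skip <;> simp_all [mergeKeys]
      | k :: gs, k' :: ts =>
        intro hx hy h1 h2
        rw [List.pairwise_cons] at hx hy
        by_cases hlt : k < k'
        · have hkts : k ∉ k' :: ts := by
            intro hmem
            rcases List.mem_cons.1 hmem with rfl | hmem
            · exact lt_irrefl _ hlt
            · exact lt_irrefl _ (lt_trans hlt (hy.1 k hmem))
          have ht : PySem.Dict.getD t k "" = "" := h1 k (by simp) hkts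
          have ihe := ih gs (k' :: ts) (by simp at hlen ⊢; omega) hx.2
            (List.pairwise_cons.2 hy)
            (fun a ha hna => h1 a (by simp [ha]) hna)
            (fun a ha hna => by
              refine h2 a ha ?_
              intro hmem
              rcases List.mem_cons.1 hmem with rfl | hmem
              · rcases List.mem_cons.1 ha with rfl | ha'
                · exact lt_irrefl _ hlt
                · exact lt_irrefl _ (lt_trans hlt (hy.1 a ha'))
              · exact hna hmem)
          simp only [alignMerge, mergeKeys, if_pos hlt, List.filter_cons, ht]
          cases skip <;> simp_all
        · by_cases hlt' : k' < k
          · have hkgs : k' ∉ k :: gs := by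
              intro hmem
              rcases List.mem_cons.1 hmem with rfl | hmem
              · exact lt_irrefl _ hlt'
              · exact lt_irrefl _ (lt_trans hlt' (hx.1 k' hmem))
            have hg : PySem.Dict.getD g k' "" = "" := h2 k' (by simp) hkgs
            have ihe := ih (k :: gs) ts (by simp at hlen ⊢; omega)
              (List.pairwise_cons.2 hx) hy.2
              (fun a ha hna => by
                refine h1 a ha ?_
                intro hmem
                rcases List.mem_cons.1 hmem with rfl | hmem
                · rcases List.mem_cons.1 ha with rfl | ha'
                  · exact lt_irrefl _ hlt'
                  · exact lt_irrefl _ (lt_trans hlt' (hx.1 a ha'))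
                · exact hna hmem)
              (fun a ha hna => h2 a (by simp [ha]) hna)
            simp only [alignMerge, mergeKeys, if_neg hlt, if_pos hlt', List.filter_cons, hg]
            cases skip <;> simp_all
          · have hkk : k = k' := le_antisymm (not_lt.1 hlt') (not_lt.1 hlt)
            subst hkk
            have ihe := ih gs ts (by simp at hlen ⊢; omega) hx.2 hy.2
              (fun a ha hna => by
                refine h1 a (by simp [ha]) ?_
                intro hmem
                rcases List.mem_cons.1 hmem with rfl | hmem
                · exact lt_irrefl _ (hx.1 a ha)
                · exact hna hmem)
              (fun a ha hna => by
                refine h2 a (by simp [ha]) ?_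
                intro hmem
                rcases List.mem_cons.1 hmem with rfl | hmem
                · exact lt_irrefl _ (hy.1 a ha)
                · exact hna hmem)
            simp only [alignMerge, mergeKeys, if_neg hlt, List.filter_cons]
            cases skip <;> simp_all
            split_ifs <;> simp_all
  intro xs ys hx hy h1 h2
  exact key (xs.length + ys.length) xs ys le_rfl hx hy h1 h2

-- ===== VERDICT (by name: the statement is the Claim_ definition above) =====
theorem align_data_spec : Claim_equal_align_data := by
  intro gt tr skip _
  unfold Spec_align_data align_data align_data_alt
  set g := PySem.Dict.ofList gt with hgdef
  set t := PySem.Dict.ofList tr with htdef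
  set kg : PySem.Set String := PySem.Set.ofList (PySem.Dict.keys g) with hkg
  set kt : PySem.Set String := PySem.Set.ofList (PySem.Dict.keys t) with hkt
  set Kg := PySem.List.sorted (PySem.Dict.keys g) (fun x => x) false with hKg
  set Kt := PySem.List.sorted (PySem.Dict.keys t) (fun x => x) false with hKt
  have hmemKg : ∀ a, a ∈ Kg ↔ a ∈ PySem.Dict.keys g := by
    intro a; rw [hKg, PySem.List.mem_sorted]
  have hmemKt : ∀ a, a ∈ Kt ↔ a ∈ PySem.Dict.keys t := by
    intro a; rw [hKt, PySem.List.mem_sorted]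
  have hpKg : Kg.Pairwise (· < ·) :=
    sorted_nodup_pairwise_lt _ (PySem.Dict.nodup_keys_ofList gt)
  have hpKt : Kt.Pairwise (· < ·) :=
    sorted_nodup_pairwise_lt _ (PySem.Dict.nodup_keys_ofList tr)
  -- B's merge as filter-map over mergeKeys
  rw [alignMerge_eq g t skip Kg Kt hpKg hpKt
    (fun a _ hna => getD_of_not_mem_keys (fun hm => hna ((hmemKt a).2 hm)))
    (fun a _ hna => getD_of_not_mem_keys (fun hm => hna ((hmemKg a).2 hm)))]
  -- A's fold as filter-map over the sorted union
  have hfold : (PySem.List.sorted (PySem.Set.union kg kt) (fun x => x) false).foldl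
      (fun aligned ts =>
        if skip && (PySem.Dict.getD g ts "" == "" || PySem.Dict.getD t ts "" == "") then aligned
        else aligned ++ [(ts, PySem.Dict.getD g ts "", PySem.Dict.getD t ts "")]) []
      = ((PySem.List.sorted (PySem.Set.union kg kt) (fun x => x) false).filter
          (fun k => !(skip && (PySem.Dict.getD g k "" == "" || PySem.Dict.getD t k "" == "")))).map
        (fun k => (k, PySem.Dict.getD g k "", PySem.Dict.getD t k "")) := by
    rw [PySem.List.foldl_congr_mem _ _
      (fun acc x => if (!(skip && (PySem.Dict.getD g x "" == "" || PySem.Dict.getD t x "" == ""))) = true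
        then acc ++ [(x, PySem.Dict.getD g x "", PySem.Dict.getD t x "")] else acc) []
      (by intro acc x _; by_cases h : (skip && (PySem.Dict.getD g x "" == "" || PySem.Dict.getD t x "" == "")) = true <;> simp [h]),
      PySem.List.foldl_append_if]
    simp
  rw [hfold]
  -- the two key sequences coincide
  have hkeys : PySem.List.sorted (PySem.Set.union kg kt) (fun x => x) false = mergeKeys Kg Kt := by
    apply PySem.List.sorted_eq_of_perm_of_pairwise_lt
    · rw [List.perm_ext_iff_of_nodup
        ((mergeKeys_pairwise Kg Kt hpKg hpKt).imp ne_of_lt)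
        (PySem.Set.nodup_union kg kt (hkg ▸ PySem.Set.nodup_ofList _))]
      intro a
      rw [mem_mergeKeys, PySem.Set.mem_union, hmemKg, hmemKt, hkg, hkt,
        PySem.Set.mem_ofList, PySem.Set.mem_ofList]
    · exact mergeKeys_pairwise Kg Kt hpKg hpKt
  rw [hkeys]
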